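-- pv_equiv track=rewrite | github.com/sowmith12/SWARMBOTS | algorithm/distribution.py | generate_assignments
-- ===== SOURCE A (Python) =====
-- import itertools
--
-- def generate_assignments(spots, n_ugvs):
--     from collections import defaultdict
--
--     ugv_ids = list(range(n_ugvs))
--     all_assignments = []
--
--     # Generate all possible distributions
--     for combo in itertools.product(ugv_ids, repeat=len(spots)):
--         assignment = defaultdict(list)
--         for idx, ugv_id in enumerate(combo):
--             assignment[ugv_id].append(spots[idx])
--         all_assignments.append(assignment)
--
--     return all_assignments
-- ===== SOURCE B (Python) =====
-- def generate_assignments(spots, n_ugvs):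
--     from collections import defaultdict
--
--     def rec(remaining, partial):
--         # base case: emit a completed assignment (as a fresh defaultdict)
--         if not remaining:
--             out = defaultdict(list)
--             for k, v in partial.items():
--                 out[k] = list(v)
--             return [out]
--         s, rest = remaining[0], remaining[1:]
--         results = []
--         for u in range(n_ugvs):
--             nxt = defaultdict(list, {k: list(v) for k, v in partial.items()})
--             nxt[u].append(s)
--             results.extend(rec(rest, nxt))
--         return results
--
--     return rec(list(spots), defaultdict(list))
-- ===== Notes on version B (the rewrite author's own statement) =====
-- stated objective: alternative
-- what changed: Replaced itertools.product over all combos plus a per-combo enumerate/append dict build with a single recursion that extends a partial assignment spot by spot, emitting a completed defaultdict at each leaf.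
import Mathlib
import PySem

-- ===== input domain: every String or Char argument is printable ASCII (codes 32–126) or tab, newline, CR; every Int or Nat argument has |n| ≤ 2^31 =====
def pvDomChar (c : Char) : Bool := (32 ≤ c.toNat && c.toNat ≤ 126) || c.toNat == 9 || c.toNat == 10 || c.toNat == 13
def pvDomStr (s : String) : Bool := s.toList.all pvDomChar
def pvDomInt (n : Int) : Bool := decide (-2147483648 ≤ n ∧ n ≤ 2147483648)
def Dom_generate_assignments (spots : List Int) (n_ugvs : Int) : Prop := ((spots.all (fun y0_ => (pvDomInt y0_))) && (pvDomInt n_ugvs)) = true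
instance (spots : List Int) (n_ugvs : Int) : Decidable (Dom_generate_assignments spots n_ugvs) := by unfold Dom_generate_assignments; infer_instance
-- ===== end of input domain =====

-- B replaces the itertools.product + per-combo dict build by a single recursive
-- enumeration that extends a partial assignment spot by spot (objective: alternative decomposition).

-- ===== PORT A =====
-- itertools.product(ugv_ids, repeat=k): first coordinate slowest
def gaProduct (ugv_ids : List Int) : Nat → List (List Int)
  | 0 => [[]]
  | n + 1 => ugv_ids.flatMap (fun u => (gaProduct ugv_ids n).map (u :: ·))

def generate_assignments (spots : List Int) (n_ugvs : Int) : List (List (Int × List Int)) :=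
  let ugv_ids := PySem.List.pyRange 0 n_ugvs 1
  (gaProduct ugv_ids spots.length).foldl
    (fun all combo =>
      let assignment : PySem.Dict Int (List Int) :=
        (PySem.List.enumerate combo 0).foldl
          (fun d p => d.modify p.2 [] (· ++ [PySem.List.pyGetD spots p.1 0])) PySem.Dict.empty
      all ++ [assignment.items]) []

-- ===== PORT B =====
-- rec(remaining, partial): extend the partial assignment with each choice for the next spot
def gaRec (n_ugvs : Int) : List Int → PySem.Dict Int (List Int) → List (List (Int × List Int))
  | [], part => [part.items]
  | s :: rest, part =>
      (PySem.List.pyRange 0 n_ugvs 1).flatMap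
        (fun u => gaRec n_ugvs rest (part.modify u [] (· ++ [s])))

def generate_assignments_alt (spots : List Int) (n_ugvs : Int) : List (List (Int × List Int)) :=
  gaRec n_ugvs spots PySem.Dict.empty

-- ===== PRECONDITION & SPEC =====
def Spec_generate_assignments (spots : List Int) (n_ugvs : Int) (out : List (List (Int × List Int))) : Prop := out = generate_assignments_alt spots n_ugvs
instance (spots : List Int) (n_ugvs : Int) (out : List (List (Int × List Int))) : Decidable (Spec_generate_assignments spots n_ugvs out) := by unfold Spec_generate_assignments; infer_instance

-- ===== CLAIM (what is proved, stated in full; the proofs are below) =====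
def Claim_equal_generate_assignments : Prop := ∀ (spots : List Int) (n_ugvs : Int), Dom_generate_assignments spots n_ugvs → Spec_generate_assignments spots n_ugvs (generate_assignments spots n_ugvs)

-- ===== LEMMAS AND PROOFS =====

-- every combo produced by gaProduct has length k
theorem gaProduct_length (R : List Int) (k : Nat) :
    ∀ c ∈ gaProduct R k, c.length = k := by
  induction k with
  | zero => intro c hc; simp [gaProduct] at hc; simp [hc]
  | succ n ih =>
    intro c hc
    simp only [gaProduct, List.mem_flatMap, List.mem_map] at hc
    obtain ⟨u, -, c', hc', rfl⟩ := hc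
    simp [ih c' hc']

-- A's enumerate-indexed fold equals a fold over zip with the corresponding suffix of spots
theorem enum_fold_eq_zip (spots : List Int) :
    ∀ (combo : List Int) (s : Nat) (d : PySem.Dict Int (List Int)),
      s + combo.length ≤ spots.length →
      (PySem.List.enumerate combo (s : Int)).foldl
          (fun d p => d.modify p.2 [] (· ++ [PySem.List.pyGetD spots p.1 0])) d
        = (combo.zip (spots.drop s)).foldl
            (fun d p => d.modify p.1 [] (· ++ [p.2])) d := by
  intro combo
  induction combo with
  | nil => intro s d _; simp [PySem.List.enumerate_nil]
  | cons u cs ih =>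
    intro s d hle
    have hs : s < spots.length := by simp at hle; omega
    rw [PySem.List.enumerate_cons]
    have hdrop : spots.drop s = spots[s] :: spots.drop (s + 1) :=
      (List.drop_eq_getElem_cons hs)
    have hget : PySem.List.pyGetD spots (s : Int) 0 = spots[s] := by
      rw [PySem.List.pyGetD_natCast]
      simp [hs]
    rw [hdrop]
    simp only [List.zip_cons_cons, List.foldl_cons, hget]
    have : ((s : Int) + 1) = ((s + 1 : Nat) : Int) := by push_cast; ring
    rw [this, ih (s + 1) _ (by simp at hle ⊢; omega)]

-- main invariant: the recursion over the remaining spots equals mapping the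
-- per-combo dict build over all products of the chosen ugv list
theorem gaRec_eq_map (n : Int) :
    ∀ (rest : List Int) (d : PySem.Dict Int (List Int)),
      gaRec n rest d
        = (gaProduct (PySem.List.pyRange 0 n 1) rest.length).map
            (fun combo => ((combo.zip rest).foldl
                (fun d p => d.modify p.1 [] (· ++ [p.2])) d).items) := by
  intro rest
  induction rest with
  | nil => intro d; simp [gaRec, gaProduct]
  | cons s r ih =>
    intro d
    simp only [gaRec, List.length_cons, gaProduct, List.map_flatMap, List.map_map]
    refine List.flatMap_congr ?_ 
    intro u _
    rw [ih]
    apply List.map_congr_left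
    intro c _
    simp

theorem generate_assignments_spec_aux (spots : List Int) (n_ugvs : Int) :
    generate_assignments spots n_ugvs = generate_assignments_alt spots n_ugvs := by
  unfold generate_assignments generate_assignments_alt
  rw [PySem.List.foldl_append_singleton_eq_map, gaRec_eq_map]
  apply List.map_congr_left
  intro c hc
  have hlen := gaProduct_length _ _ c hc
  have := enum_fold_eq_zip spots c 0 PySem.Dict.empty (by omega)
  simp only [List.drop_zero, Nat.cast_zero] at this
  exact congrArg PySem.Dict.items this

-- ===== VERDICT (by name: the statement is the Claim_ definition above) =====
theorem generate_assignments_spec : Claim_equal_generate_assignments := by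
  intro spots n_ugvs _
  exact generate_assignments_spec_aux spots n_ugvs
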